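-- pv_equiv track=rewrite | github.com/awawa-agi/agent-factory | src/agentfactory/data/rl_dataset.py | transform_masks
-- ===== SOURCE A (Python) =====
-- def transform_masks(assistant_masks):
--     """Transform assistant masks to group indices.
--
--     Example: [0,0,1,1,0,1,1,1] -> [0,0,1,1,0,2,2,2]
--     """
--     result = []
--     group = 0
--     prev = 0
--
--     for mask in assistant_masks:
--         if mask == 1 and prev == 0:
--             group += 1
--         result.append(mask * group)
--         prev = mask
--
--     return result
-- ===== SOURCE B (Python) =====
-- def transform_masks(assistant_masks):
--     """Transform assistant masks to group indices (run-length decomposition)."""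
--     # Phase 1: run-length encode consecutive equal values.
--     runs = []
--     for m in assistant_masks:
--         if runs and runs[-1][0] == m:
--             runs[-1][1] += 1
--         else:
--             runs.append([m, 1])
--     # Phase 2: one decision per run; a 0->1 transition only happens at a run start.
--     out = []
--     group = 0
--     prev = 0
--     for v, n in runs:
--         if v == 1 and prev == 0:
--             group += 1
--         out.extend([v * group] * n)
--         prev = v
--     return out
-- ===== Notes on version B (the rewrite author's own statement) =====
-- stated objective: alternative
-- what changed: Replaces A's per-element stateful loop with a two-phase run-length decomposition: first run-length encode consecutive equal values, then make one group decision per run and emit each run's labels in a block.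
import Mathlib
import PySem

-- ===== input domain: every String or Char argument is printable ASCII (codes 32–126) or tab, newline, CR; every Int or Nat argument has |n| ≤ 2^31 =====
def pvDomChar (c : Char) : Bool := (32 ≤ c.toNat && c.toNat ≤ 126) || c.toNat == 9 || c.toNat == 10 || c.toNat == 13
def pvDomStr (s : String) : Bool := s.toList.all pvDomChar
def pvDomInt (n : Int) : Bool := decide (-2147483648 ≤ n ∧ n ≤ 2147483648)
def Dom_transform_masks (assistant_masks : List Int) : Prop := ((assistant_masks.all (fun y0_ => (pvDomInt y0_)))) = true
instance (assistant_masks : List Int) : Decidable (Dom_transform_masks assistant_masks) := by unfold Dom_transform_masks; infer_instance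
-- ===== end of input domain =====

-- B replaces A's single stateful element loop by a run-length decomposition
-- (one group decision per run of equal values); objective: alternative, same O(n) cost.

-- ===== PORT A =====
def transform_masks (assistant_masks : List Int) : List Int :=
  (assistant_masks.foldl
    (fun (st : List Int × Int × Int) mask =>
      let group := if mask = 1 ∧ st.2.2 = 0 then st.2.1 + 1 else st.2.1
      (st.1 ++ [mask * group], group, mask))
    ([], 0, 0)).1

-- ===== PORT B =====
-- helper of Source B's phase 1: append m to the run list, extending the last run if it has value m
def pvPush (runs : List (Int × Nat)) (m : Int) : List (Int × Nat) :=
  match runs with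
  | [] => [(m, 1)]
  | [r] => if r.1 = m then [(r.1, r.2 + 1)] else [r, (m, 1)]
  | r :: rs => r :: pvPush rs m

def transform_masks_alt (assistant_masks : List Int) : List Int :=
  let runs := assistant_masks.foldl pvPush []
  (runs.foldl
    (fun (st : List Int × Int × Int) r =>
      let group := if r.1 = 1 ∧ st.2.2 = 0 then st.2.1 + 1 else st.2.1
      (st.1 ++ List.replicate r.2 (r.1 * group), group, r.1))
    ([], 0, 0)).1

-- ===== PRECONDITION & SPEC =====
def Spec_transform_masks (assistant_masks : List Int) (out : List Int) : Prop := out = transform_masks_alt assistant_masks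
instance (assistant_masks : List Int) (out : List Int) : Decidable (Spec_transform_masks assistant_masks out) := by unfold Spec_transform_masks; infer_instance

-- ===== CLAIM (what is proved, stated in full; the proofs are below) =====
def Claim_equal_transform_masks : Prop := ∀ (assistant_masks : List Int), Dom_transform_masks assistant_masks → Spec_transform_masks assistant_masks (transform_masks assistant_masks)

-- ===== LEMMAS AND PROOFS =====

-- reference function: A's loop written as structural recursion on the list
def pvRef (g p : Int) : List Int → List Int
  | [] => []
  | m :: xs =>
    let g' := if m = 1 ∧ p = 0 then g + 1 else g
    m * g' :: pvRef g' m xs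

-- the runs of xs given an open run (v, n)
def pvGrow (v : Int) (n : Nat) : List Int → List (Int × Nat)
  | [] => [(v, n)]
  | x :: xs => if x = v then pvGrow v (n + 1) xs else (v, n) :: pvGrow x 1 xs

theorem foldA_ref (xs : List Int) : ∀ (res : List Int) (g p : Int),
    (xs.foldl
      (fun (st : List Int × Int × Int) mask =>
        let group := if mask = 1 ∧ st.2.2 = 0 then st.2.1 + 1 else st.2.1
        (st.1 ++ [mask * group], group, mask))
      (res, g, p)).1 = res ++ pvRef g p xs := by
  induction xs with
  | nil => intro res g p; simp [pvRef]
  | cons x xs ih =>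
    intro res g p
    simp only [List.foldl_cons, pvRef]
    rw [ih]
    simp

theorem push_last (rs : List (Int × Nat)) (v : Int) (n : Nat) (m : Int) :
    pvPush (rs ++ [(v, n)]) m =
      if v = m then rs ++ [(v, n + 1)] else rs ++ [(v, n), (m, 1)] := by
  induction rs with
  | nil => simp [pvPush]
  | cons r rs ih =>
    cases rs with
    | nil => by_cases h : v = m <;> simp [pvPush, h]
    | cons s rs =>
      have hstep : pvPush ((r :: s :: rs) ++ [(v, n)]) m
          = r :: pvPush ((s :: rs) ++ [(v, n)]) m := by
        simp [pvPush]
      rw [hstep, ih]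
      split <;> simp

theorem foldl_push_grow (xs : List Int) : ∀ (rs : List (Int × Nat)) (v : Int) (n : Nat),
    List.foldl pvPush (rs ++ [(v, n)]) xs = rs ++ pvGrow v n xs := by
  induction xs with
  | nil => intro rs v n; simp [pvGrow]
  | cons x xs ih =>
    intro rs v n
    simp only [List.foldl_cons, push_last, pvGrow]
    by_cases h : x = v
    · subst h; simp [ih]
    · have hv : ¬ v = x := fun hh => h hh.symm
      simp only [if_neg hv, if_neg h]
      have : rs ++ [(v, n), (x, 1)] = (rs ++ [(v, n)]) ++ [(x, 1)] := by simp
      rw [this, ih]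
      simp

theorem ref_replicate (n : Nat) (v g p : Int) (xs : List Int) :
    pvRef g p (List.replicate (n + 1) v ++ xs) =
      List.replicate (n + 1) (v * (if v = 1 ∧ p = 0 then g + 1 else g)) ++
        pvRef (if v = 1 ∧ p = 0 then g + 1 else g) v xs := by
  induction n generalizing g p with
  | zero => simp [pvRef]
  | succ n ih =>
    rw [List.replicate_succ, List.cons_append, pvRef]
    have hvv : ¬ (v = 1 ∧ v = 0) := by
      rintro ⟨h1, h0⟩; rw [h1] at h0; exact one_ne_zero h0
    rw [ih (if v = 1 ∧ p = 0 then g + 1 else g) v]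
    simp [hvv, List.replicate_succ]

theorem foldB_grow (xs : List Int) : ∀ (v : Int) (n : Nat) (g p : Int) (out : List Int),
    ((pvGrow v (n + 1) xs).foldl
      (fun (st : List Int × Int × Int) r =>
        let group := if r.1 = 1 ∧ st.2.2 = 0 then st.2.1 + 1 else st.2.1
        (st.1 ++ List.replicate r.2 (r.1 * group), group, r.1))
      (out, g, p)).1 = out ++ pvRef g p (List.replicate (n + 1) v ++ xs) := by
  induction xs with
  | nil =>
    intro v n g p out
    have h := ref_replicate n v g p []
    simp only [List.append_nil] at h
    simp [pvGrow, h, pvRef]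
  | cons x xs ih =>
    intro v n g p out
    by_cases h : x = v
    · subst h
      rw [pvGrow, if_pos rfl, ih]
      have hrep : List.replicate (n + 1) x ++ x :: xs
          = List.replicate (n + 1 + 1) x ++ xs := by
        rw [List.append_cons, ← List.replicate_succ']
      rw [hrep]
    · rw [pvGrow, if_neg h]
      simp only [List.foldl_cons]
      rw [ref_replicate]
      have h1 := ih x 0 (if v = 1 ∧ p = 0 then g + 1 else g) v
        (out ++ List.replicate (n + 1) (v * (if v = 1 ∧ p = 0 then g + 1 else g)))
      simpa [pvRef] using h1

theorem transform_masks_eq_ref (xs : List Int) : transform_masks xs = pvRef 0 0 xs := by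
  unfold transform_masks
  rw [foldA_ref]
  simp

theorem transform_masks_alt_eq_ref (xs : List Int) : transform_masks_alt xs = pvRef 0 0 xs := by
  cases xs with
  | nil => simp [transform_masks_alt, pvRef]
  | cons x xs =>
    unfold transform_masks_alt
    simp only [List.foldl_cons]
    have h1 : pvPush [] x = [] ++ [(x, 1)] := by simp [pvPush]
    rw [h1, foldl_push_grow]
    simpa using foldB_grow xs x 0 0 0 []

-- ===== VERDICT (by name: the statement is the Claim_ definition above) =====
theorem transform_masks_spec : Claim_equal_transform_masks := by
  intro xs _
  unfold Spec_transform_masks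
  rw [transform_masks_eq_ref, transform_masks_alt_eq_ref]
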